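-- pv_equiv track=rewrite | github.com/Albertzry/LeetCode | 2551-apply-operations-to-an-array/2551-apply-operations-to-an-array.py | applyOperations
-- ===== SOURCE A (Python) =====
-- from typing import List
--
-- def applyOperations(nums: List[int]) -> List[int]:
--     n=len(nums)
--     stack=[]
--     for i in range(n):
--         if nums[i]!=0:
--             if i<n-1 and nums[i]==nums[i+1]:
--                 nums[i]*=2
--                 nums[i+1]=0
--             stack.append(nums[i])
--     m=len(stack)
--     stack+=[0]*(n-m)
--     return stack
-- ===== SOURCE B (Python) =====
-- from typing import List
--
-- def applyOperations(nums: List[int]) -> List[int]: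
--     n = len(nums)
--     res = []
--     i = 0
--     while i < n:
--         j = i
--         while j < n and nums[j] == nums[i]:
--             j += 1
--         x = nums[i]
--         k = j - i
--         if x != 0:
--             res.extend([2 * x] * (k // 2))
--             if k % 2:
--                 res.append(x)
--         i = j
--     return res + [0] * (n - len(res))
-- ===== Notes on version B (the rewrite author's own statement) =====
-- stated objective: alternative
-- what changed: A does one index loop mutating nums in place (double equal adjacent pair, zero the right one, skip zeros while appending); B never mutates: it scans maximal runs of equal values with two pointers and emits k//2 doubled values plus an odd leftover per nonzero run, then pads with zeros.
import Mathlib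
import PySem

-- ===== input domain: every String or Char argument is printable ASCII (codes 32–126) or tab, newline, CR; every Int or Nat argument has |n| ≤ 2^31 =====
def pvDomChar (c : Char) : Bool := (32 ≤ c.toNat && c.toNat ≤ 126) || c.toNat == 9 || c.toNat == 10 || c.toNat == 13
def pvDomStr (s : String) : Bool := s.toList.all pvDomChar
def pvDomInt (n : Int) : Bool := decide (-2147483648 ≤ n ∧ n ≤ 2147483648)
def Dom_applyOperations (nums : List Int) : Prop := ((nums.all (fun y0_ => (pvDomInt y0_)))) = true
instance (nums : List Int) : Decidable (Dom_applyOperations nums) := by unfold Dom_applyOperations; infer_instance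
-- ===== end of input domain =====

-- B replaces A's in-place pair-mutation loop by a non-mutating two-pointer run-length
-- scan; equivalence is about the RETURN value only (A mutates nums, B does not).
-- ===== PORT A =====
-- A's loop over i in range(n): the list is the mutated suffix nums[i:]; writing
-- nums[i+1]=0 becomes recursing on 0::t; appended stack elements are emitted in order.
def aLoop : List Int → List Int
  | [] => []
  | [x] => if x ≠ 0 then [x] else []
  | x :: y :: t =>
    if x ≠ 0 then
      if x = y then (2 * x) :: aLoop (0 :: t) else x :: aLoop (y :: t)
    else aLoop (y :: t)
termination_by l => l.length
decreasing_by all_goals (simp; try omega)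

def applyOperations (nums : List Int) : List Int :=
  let n := nums.length
  let stack := aLoop nums
  let m := stack.length
  stack ++ List.replicate (n - m) 0

-- ===== PORT B =====
-- B's inner while loop: count the leading run of values equal to x, return (run length
-- after the first element, remaining suffix).
def bSpan (x : Int) : List Int → Nat × List Int
  | [] => (0, [])
  | y :: t => if y = x then ((bSpan x t).1 + 1, (bSpan x t).2) else (0, y :: t)

theorem bSpan_len (x : Int) (t : List Int) : (bSpan x t).2.length ≤ t.length := by
  induction t with
  | nil => simp [bSpan]
  | cons y t ih => simp only [bSpan]; split_ifs <;> simp; omega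

-- B's outer while loop: one step per maximal run; a nonzero run of length k emits
-- k/2 copies of 2*x plus, if k is odd, one x.
def bLoop : List Int → List Int
  | [] => []
  | x :: t =>
    let k := (bSpan x t).1 + 1
    (if x ≠ 0 then
       List.replicate (k / 2) (2 * x) ++ (if k % 2 = 1 then [x] else [])
     else []) ++ bLoop (bSpan x t).2
termination_by l => l.length
decreasing_by simpa using Nat.lt_succ_of_le (bSpan_len x t)

def applyOperations_alt (nums : List Int) : List Int :=
  let n := nums.length
  let res := bLoop nums
  res ++ List.replicate (n - res.length) 0

-- ===== PRECONDITION & SPEC =====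
def Spec_applyOperations (nums : List Int) (out : List Int) : Prop := out = applyOperations_alt nums
instance (nums : List Int) (out : List Int) : Decidable (Spec_applyOperations nums out) := by unfold Spec_applyOperations; infer_instance

-- ===== CLAIM (what is proved, stated in full; the proofs are below) =====
def Claim_equal_applyOperations : Prop := ∀ (nums : List Int), Dom_applyOperations nums → Spec_applyOperations nums (applyOperations nums)

-- ===== LEMMAS AND PROOFS =====

theorem bSpan_decomp (x : Int) (t : List Int) :
    t = List.replicate (bSpan x t).1 x ++ (bSpan x t).2 := by
  induction t with
  | nil => simp [bSpan]
  | cons y t ih =>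
    simp only [bSpan]
    split_ifs with h
    · subst h; simpa [List.replicate_succ] using ih
    · simp

theorem bSpan_head (x : Int) (t : List Int) (y : Int) (t' : List Int)
    (h : (bSpan x t).2 = y :: t') : y ≠ x := by
  induction t with
  | nil => simp [bSpan] at h
  | cons z t ih =>
    simp only [bSpan] at h
    split_ifs at h with hz
    · exact ih h
    · cases h; simpa using hz

theorem aLoop_zero_cons (t : List Int) : aLoop (0 :: t) = aLoop t := by
  cases t <;> simp [aLoop]

theorem aLoop_zero_run (k : Nat) (r : List Int) :
    aLoop (List.replicate k 0 ++ r) = aLoop r := by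
  induction k with
  | zero => simp
  | succ k ih => simpa [List.replicate_succ, aLoop_zero_cons] using ih

-- a nonzero run of length m, followed by r whose head differs from x
theorem aLoop_run (x : Int) (hx : x ≠ 0) :
    ∀ (m : Nat) (r : List Int), (∀ y t', r = y :: t' → y ≠ x) →
    aLoop (List.replicate m x ++ r) =
      List.replicate (m / 2) (2 * x) ++ (if m % 2 = 1 then [x] else []) ++ aLoop r := by
  intro m
  induction m using Nat.strong_induction_on with
  | _ m ih =>
    intro r hr
    match m with
    | 0 => simp
    | 1 =>
      cases r with
      | nil => simp [aLoop, hx]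
      | cons y t' =>
        have hy := hr y t' rfl
        simp [List.replicate_succ, aLoop, hx, Ne.symm hy]
    | (m + 2) =>
      have h2x : (2 : Int) * x ≠ 0 := by
        intro hc; exact hx (by omega)
      have step : aLoop (List.replicate (m + 2) x ++ r)
          = 2 * x :: aLoop (List.replicate m x ++ r) := by
        cases m with
        | zero =>
          cases r with
          | nil => simp [aLoop, hx]
          | cons y t' =>
            have hy := hr y t' rfl
            simp [List.replicate_succ, aLoop, hx, aLoop_zero_cons]
        | succ m' =>
          simp [List.replicate_succ, aLoop, hx, aLoop_zero_cons]
      rw [step, ih m (by omega) r hr]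
      have hdiv : (m + 2) / 2 = m / 2 + 1 := by omega
      have hmod : (m + 2) % 2 = m % 2 := by omega
      simp [hdiv, hmod, List.replicate_succ]

theorem aLoop_eq_bLoop : ∀ (n : Nat) (l : List Int), l.length ≤ n → aLoop l = bLoop l := by
  intro n
  induction n with
  | zero =>
    intro l h
    cases l with
    | nil => simp [aLoop, bLoop]
    | cons a t => simp at h
  | succ n ih =>
    intro l h
    cases l with
    | nil => simp [aLoop, bLoop]
    | cons x t =>
      have hdec := bSpan_decomp x t
      have hlen : (bSpan x t).2.length ≤ n := by
        have := bSpan_len x t; simp at h; omega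
      have hl : x :: t = List.replicate ((bSpan x t).1 + 1) x ++ (bSpan x t).2 := by
        rw [List.replicate_succ]; simpa using hdec
      by_cases hx : x = 0
      · subst hx
        conv_lhs => rw [hl]
        rw [aLoop_zero_run]
        simp only [bLoop]
        simpa using ih _ hlen
      · conv_lhs => rw [hl]
        rw [aLoop_run x hx _ _ (fun y t' he => bSpan_head x t y t' he)]
        simp only [bLoop]
        simp [hx, ih _ hlen]

-- ===== VERDICT (by name: the statement is the Claim_ definition above) =====
theorem applyOperations_spec : Claim_equal_applyOperations := by
  intro nums _
  unfold Spec_applyOperations applyOperations applyOperations_alt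
  simp [aLoop_eq_bLoop nums.length nums (le_refl _)]
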